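-- pv_equiv track=rewrite | github.com/nkchangliu/puzzles | leetcode/trap_rain_water.py | find_highest_two
-- ===== SOURCE A (Python) =====
-- def find_highest_two(lst, start, end):
--     high_f, high_s = None, None
--     for i in range(start, end + 1):
--         if high_f is None or lst[i] > lst[high_f]:
--             high_f, high_s = i, high_f
--         elif high_s is None or lst[i] > lst[high_s]:
--             high_s = i
--     return min(high_f, high_s), max(high_f, high_s)
-- ===== SOURCE B (Python) =====
-- def find_highest_two(lst, start, end):
--     # Two independent argmax passes: first = argmax over the range,
--     # second = argmax over the range skipping the index `first`.
--     first = None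
--     for i in range(start, end + 1):
--         if first is None or lst[i] > lst[first]:
--             first = i
--     second = None
--     for i in range(start, end + 1):
--         if i == first:
--             continue
--         if second is None or lst[i] > lst[second]:
--             second = i
--     return min(first, second), max(first, second)
-- ===== Notes on version B (the rewrite author's own statement) =====
-- stated objective: alternative
-- what changed: Replaces A's single online top-two fold (shifting first into second on every new maximum) by two independent first-occurrence argmax passes, the second skipping the index chosen by the first.
import Mathlib
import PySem

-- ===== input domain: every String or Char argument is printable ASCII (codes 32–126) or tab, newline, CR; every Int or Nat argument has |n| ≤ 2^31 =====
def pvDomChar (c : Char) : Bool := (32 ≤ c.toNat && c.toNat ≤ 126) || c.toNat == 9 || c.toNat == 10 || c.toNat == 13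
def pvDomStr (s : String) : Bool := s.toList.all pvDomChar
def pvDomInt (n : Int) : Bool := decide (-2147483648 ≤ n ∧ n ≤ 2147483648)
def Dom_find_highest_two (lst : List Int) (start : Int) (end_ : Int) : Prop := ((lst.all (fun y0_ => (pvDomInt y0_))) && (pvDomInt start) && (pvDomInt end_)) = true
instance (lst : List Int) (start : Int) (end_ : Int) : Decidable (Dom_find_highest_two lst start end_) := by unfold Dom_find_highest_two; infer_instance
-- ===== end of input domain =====

-- B replaces A's single online top-two fold by two independent argmax passes (the second
-- skipping the index found by the first); objective: alternative decomposition, same cost.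

-- ===== PORT A =====
-- A's loop body: the online top-two update (lst[i] via pyGetD; Pre_ keeps every index in range)
def fhtStepA (lst : List Int) (st : Option Int × Option Int) (i : Int) : Option Int × Option Int :=
  match st with
  | (f, s) =>
    match f with
    | none => (some i, f)
    | some fi =>
      if PySem.List.pyGetD lst i 0 > PySem.List.pyGetD lst fi 0 then (some i, f)
      else
        match s with
        | none => (f, some i)
        | some si =>
          if PySem.List.pyGetD lst i 0 > PySem.List.pyGetD lst si 0 then (f, some i)
          else (f, s)

def find_highest_two (lst : List Int) (start : Int) (end_ : Int) : Int × Int :=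
  let fs := (PySem.List.pyRange start (end_ + 1) 1).foldl (fhtStepA lst) (none, none)
  match fs.1, fs.2 with
  | some f, some s => (min f s, max f s)
  | _, _ => (0, 0)  -- Python raises TypeError here (min(None, …)); excluded by Pre_

-- ===== PORT B =====
-- B's first pass: first-occurrence argmax
def fhtStep1 (lst : List Int) (acc : Option Int) (i : Int) : Option Int :=
  match acc with
  | none => some i
  | some a => if PySem.List.pyGetD lst i 0 > PySem.List.pyGetD lst a 0 then some i else acc

-- B's second pass: argmax skipping the index `first`
def fhtStep2 (lst : List Int) (first : Option Int) (acc : Option Int) (i : Int) : Option Int :=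
  if some i = first then acc
  else
    match acc with
    | none => some i
    | some a => if PySem.List.pyGetD lst i 0 > PySem.List.pyGetD lst a 0 then some i else acc

def find_highest_two_alt (lst : List Int) (start : Int) (end_ : Int) : Int × Int :=
  let idxs := PySem.List.pyRange start (end_ + 1) 1
  let first := idxs.foldl (fhtStep1 lst) none
  let second := idxs.foldl (fhtStep2 lst first) none
  match first with
  | none => (0, 0)  -- Python raises TypeError here; excluded by Pre_
  | some f =>
    match second with
    | none => (0, 0)  -- likewise excluded by Pre_
    | some s => (min f s, max f s)

-- ===== PRECONDITION & SPEC =====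
-- Pre_: the range has at least two indices (else min(None,…) raises TypeError) and every
-- index start..end_ is a valid Python index of lst (else IndexError); negative in-range
-- indices (Python wraparound) are admitted.
def Pre_find_highest_two (lst : List Int) (start : Int) (end_ : Int) : Prop :=
  start + 1 ≤ end_ ∧ -(lst.length : Int) ≤ start ∧ end_ < (lst.length : Int)
instance (lst : List Int) (start : Int) (end_ : Int) : Decidable (Pre_find_highest_two lst start end_) := by unfold Pre_find_highest_two; infer_instance

def pvWitness_find_highest_two : List Int × Int × Int := ([3, 1, 2], 0, 2)

def Spec_find_highest_two (lst : List Int) (start : Int) (end_ : Int) (out : Int × Int) : Prop := out = find_highest_two_alt lst start end_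
instance (lst : List Int) (start : Int) (end_ : Int) (out : Int × Int) : Decidable (Spec_find_highest_two lst start end_ out) := by unfold Spec_find_highest_two; infer_instance

-- ===== CLAIM (what is proved, stated in full; the proofs are below) =====
def Claim_equal_find_highest_two : Prop := ∀ (lst : List Int) (start : Int) (end_ : Int), Dom_find_highest_two lst start end_ → Pre_find_highest_two lst start end_ → Spec_find_highest_two lst start end_ (find_highest_two lst start end_)

-- ===== LEMMAS AND PROOFS =====

-- first pass never returns to none
theorem fht_fold1_some (lst : List Int) (q : List Int) (a : Int) :
    ∃ b, q.foldl (fhtStep1 lst) (some a) = some b := by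
  induction q generalizing a with
  | nil => exact ⟨a, rfl⟩
  | cons x q ih =>
    simp only [List.foldl_cons, fhtStep1]
    split <;> exact ih _

-- first pass result is a member of the list (or was the accumulator)
theorem fht_fold1_mem (lst : List Int) (q : List Int) (acc : Option Int) (b : Int)
    (h : q.foldl (fhtStep1 lst) acc = some b) : b ∈ q ∨ acc = some b := by
  induction q generalizing acc with
  | nil => exact Or.inr h
  | cons x q ih =>
    simp only [List.foldl_cons] at h
    rcases ih _ h with h' | h'
    · exact Or.inl (List.mem_cons_of_mem _ h')
    · cases acc with
      | none => simp only [fhtStep1] at h'; simp at h'; simp [h']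
      | some a =>
        simp only [fhtStep1] at h'
        split at h'
        · simp at h'; exact Or.inl (by simp [h'])
        · exact Or.inr h'

-- second pass with a skip value not occurring in the list is the plain first pass
theorem fht_fold2_not_mem (lst : List Int) (q : List Int) (x : Int) (acc : Option Int)
    (hx : x ∉ q) : q.foldl (fhtStep2 lst (some x)) acc = q.foldl (fhtStep1 lst) acc := by
  induction q generalizing acc with
  | nil => rfl
  | cons y q ih =>
    simp only [List.mem_cons, not_or] at hx
    simp only [List.foldl_cons]
    rw [ih _ hx.2]
    congr 1
    unfold fhtStep2 fhtStep1
    rw [if_neg (by simp [Ne.symm hx.1])]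

-- the key invariant: A's fold equals (B's first pass, B's second pass skipping that first)
theorem fht_main (lst : List Int) (q : List Int) (hq : q.Nodup) :
    q.foldl (fhtStepA lst) (none, none) =
      (q.foldl (fhtStep1 lst) none,
       q.foldl (fhtStep2 lst (q.foldl (fhtStep1 lst) none)) none) := by
  induction q using List.reverseRecOn with
  | nil => rfl
  | append_singleton q x ih =>
    rw [List.nodup_append] at hq
    have hx : x ∉ q := fun hmem => hq.2.2 x hmem x (List.mem_singleton.mpr rfl) rfl
    have hq' : q.Nodup := hq.1
    simp only [List.foldl_append, List.foldl_cons, List.foldl_nil, ih hq']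
    cases hf0 : q.foldl (fhtStep1 lst) none with
    | none =>
      cases q with
      | nil => simp [fhtStepA, fhtStep1, fhtStep2]
      | cons y q' =>
        exfalso
        simp only [List.foldl_cons, fhtStep1] at hf0
        obtain ⟨b, hb⟩ := fht_fold1_some lst q' y
        rw [hb] at hf0
        simp at hf0
    | some a =>
      have ha : a ∈ q := by
        rcases fht_fold1_mem lst q none a hf0 with h | h
        · exact h
        · simp at h
      have hax : x ≠ a := fun h => hx (h ▸ ha)
      by_cases hgt : PySem.List.pyGetD lst x 0 > PySem.List.pyGetD lst a 0
      · -- x becomes the new first; new second = old first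
        have h1 : fhtStep1 lst (some a) x = some x := by simp [fhtStep1, hgt]
        rw [h1]
        rw [fht_fold2_not_mem lst q x none hx, hf0]
        simp [fhtStepA, fhtStep2, hgt]
      · -- first unchanged; second takes the elif step with x
        have h1 : fhtStep1 lst (some a) x = some a := by simp [fhtStep1, hgt]
        simp only [h1]
        cases hs0 : q.foldl (fhtStep2 lst (some a)) none with
        | none => simp [fhtStepA, fhtStep2, hgt, hax]
        | some b => by_cases h : PySem.List.pyGetD lst x 0 > PySem.List.pyGetD lst b 0 <;>
            simp [fhtStepA, fhtStep2, hgt, hax, h]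

-- ===== VERDICT (by name: the statement is the Claim_ definition above) =====
theorem find_highest_two_spec : Claim_equal_find_highest_two := by
  intro lst start end_ _ _
  show find_highest_two lst start end_ = find_highest_two_alt lst start end_
  simp only [find_highest_two, find_highest_two_alt]
  rw [fht_main lst _ (PySem.List.nodup_pyRange_one start (end_ + 1))]
  generalize (PySem.List.pyRange start (end_ + 1) 1).foldl (fhtStep1 lst) none = p1
  generalize (PySem.List.pyRange start (end_ + 1) 1).foldl (fhtStep2 lst p1) none = p2
  cases p1 <;> cases p2 <;> rfl
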